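-- pv_equiv track=rewrite | github.com/Duo-Lu/CMPT310 | Assignment3/a3_q1.py | make_n_queen_col
-- ===== SOURCE A (Python) =====
-- def make_n_queen_col(N):
--     queen_list = []
--     row_list = []
--     for row in range(N):
--         row_list = []
--         for col in range(N * N):
--             if col % N == row:
--                 row_list.append(col + 1)
--         queen_list.append(row_list)
--
--     return queen_list
-- ===== SOURCE B (Python) =====
-- def make_n_queen_col(N):
--     # Closed form: row r consists of k*N + r + 1 for k = 0..N-1,
--     # instead of scanning all N*N columns and filtering col % N == r.
--     return [[k * N + row + 1 for k in range(N)] for row in range(N)]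
-- ===== Notes on version B (the rewrite author's own statement) =====
-- stated objective: faster
-- what changed: Replaces the per-row scan over all N*N candidates filtered by col % N == row with the closed form k*N + row + 1 for k in range(N), eliminating the inner filter pass entirely.
import Mathlib
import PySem

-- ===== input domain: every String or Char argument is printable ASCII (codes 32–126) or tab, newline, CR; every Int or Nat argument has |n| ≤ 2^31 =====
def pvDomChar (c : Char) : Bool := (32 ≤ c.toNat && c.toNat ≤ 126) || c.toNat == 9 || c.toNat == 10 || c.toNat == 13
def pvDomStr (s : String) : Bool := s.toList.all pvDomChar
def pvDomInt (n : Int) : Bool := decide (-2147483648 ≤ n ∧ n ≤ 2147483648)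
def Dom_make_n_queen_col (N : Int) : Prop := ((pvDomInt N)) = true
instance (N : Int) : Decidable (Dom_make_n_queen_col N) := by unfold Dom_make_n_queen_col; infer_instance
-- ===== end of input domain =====

-- B replaces A's per-row filter over all N*N column candidates by the closed form
-- k*N + row + 1 for k in range(N); objective: faster (no inner N*N scan).

-- ===== PORT A =====
def make_n_queen_col (N : Int) : List (List Int) :=
  (PySem.List.pyRange 0 N 1).foldl
    (fun queen_list row =>
      queen_list ++
        [(PySem.List.pyRange 0 (N * N) 1).foldl
          (fun row_list col =>
            if PySem.Int.mod col N == row then row_list ++ [col + 1] else row_list) []])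
    []

-- ===== PORT B =====
def make_n_queen_col_alt (N : Int) : List (List Int) :=
  (PySem.List.pyRange 0 N 1).map
    (fun row => (PySem.List.pyRange 0 N 1).map (fun k => k * N + row + 1))

-- ===== PRECONDITION & SPEC =====
def Spec_make_n_queen_col (N : Int) (out : List (List Int)) : Prop := out = make_n_queen_col_alt N
instance (N : Int) (out : List (List Int)) : Decidable (Spec_make_n_queen_col N out) := by unfold Spec_make_n_queen_col; infer_instance

-- ===== CLAIM (what is proved, stated in full; the proofs are below) =====
def Claim_equal_make_n_queen_col : Prop := ∀ (N : Int), Dom_make_n_queen_col N → Spec_make_n_queen_col N (make_n_queen_col N)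

-- ===== LEMMAS AND PROOFS =====

-- range n filtered by equality with r < n is exactly [r]
theorem pv_filter_range_eq (n r : Nat) (h : r < n) :
    (List.range n).filter (· == r) = [r] := by
  rw [List.filter_beq r, List.count_range, if_pos h, List.replicate_one]

-- Nat core: filtering range (a*n) by (· % n == r) yields [k*n + r | k < a]
theorem pv_filter_range_mul (n r : Nat) (h : r < n) :
    ∀ a : Nat, (List.range (a * n)).filter (fun c => c % n == r)
      = (List.range a).map (fun k => k * n + r) := by
  intro a
  induction a with
  | zero => simp
  | succ a ih =>
    rw [Nat.succ_mul, List.range_add, List.filter_append, ih,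
        List.filter_map, List.range_succ, List.map_append]
    congr 1
    have hcong : (List.range n).filter ((fun c => c % n == r) ∘ (a * n + ·))
        = (List.range n).filter (· == r) := by
      apply List.filter_congr
      intro x hx
      simp only [List.mem_range] at hx
      simp [Nat.mod_eq_of_lt hx]
    rw [hcong, pv_filter_range_eq n r h]
    simp [Nat.add_comm]

-- A's inner loop equals B's closed-form row, for 0 ≤ row < N
theorem pv_inner_row (N row : Int) (h0 : 0 ≤ row) (h1 : row < N) :
    (PySem.List.pyRange 0 (N * N) 1).foldl
      (fun row_list col =>
        if PySem.Int.mod col N == row then row_list ++ [col + 1] else row_list) []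
      = (PySem.List.pyRange 0 N 1).map (fun k => k * N + row + 1) := by
  rw [PySem.List.foldl_append_if (fun col => PySem.Int.mod col N == row) (fun col => col + 1)]
  have hN : 0 < N := lt_of_le_of_lt h0 h1
  obtain ⟨n, rfl⟩ : ∃ n : Nat, N = (n : Int) := ⟨N.toNat, (Int.toNat_of_nonneg hN.le).symm⟩
  obtain ⟨r, rfl⟩ : ∃ m : Nat, row = (m : Int) := ⟨row.toNat, (Int.toNat_of_nonneg h0).symm⟩
  have hrn : r < n := by exact_mod_cast h1
  rw [PySem.List.pyRange_one, PySem.List.pyRange_one]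
  simp only [Int.sub_zero, Int.zero_add, ← Int.natCast_mul, Int.toNat_natCast]
  rw [List.filter_map]
  have hcong : (List.range (n * n)).filter
      ((fun col => PySem.Int.mod col (n:Int) == (r:Int)) ∘ (fun k : Nat => (k : Int)))
      = (List.range (n * n)).filter (fun c => c % n == r) := by
    apply List.filter_congr
    intro c _
    simp [PySem.Int.mod_natCast]
    omega
  rw [hcong, pv_filter_range_mul n r hrn n]
  simp [Function.comp, Int.add_assoc]

-- ===== VERDICT (by name: the statement is the Claim_ definition above) =====
theorem make_n_queen_col_spec : Claim_equal_make_n_queen_col := by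
  intro N _
  unfold Spec_make_n_queen_col make_n_queen_col make_n_queen_col_alt
  rw [PySem.List.foldl_append_singleton_eq_map]
  apply List.map_congr_left
  intro row hrow
  rw [PySem.List.mem_pyRange_one] at hrow
  exact pv_inner_row N row hrow.1 hrow.2
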